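-- pv_equiv track=rewrite | github.com/pypi-data/pypi-mirror-299 | packages/geoprocessing/geoprocessing-3.1.4-py3-none-any.whl/geoprocessing/coords_utils.py | make_subsets
-- ===== SOURCE A (Python) =====
-- from typing import List, Union, NamedTuple
--
-- def make_subsets(booleans: List[bool]) -> List[Union[List[int], None]]:
--     ''' Returns a list of subsets, where each subset forms a potential segment. A subset is a list of indexes.
--
--     Note:
--         There is a little hack with None values in the list - if the points is not close to
--         the current geometry, we will insert a None that will be used in the fechet function.
--
--     Args:
--         booleans : a list of booleans where Nth boolean is True if Nth points is potentially in a segment.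
--
--     Return:
--         Each inner list in the resulting list is a list containing points of a potential segment.
--     '''
--     subset = []
--     result = []
--     for b in range(0, len(booleans)):
--         if booleans[b]:
--             subset.append(b)
--             continue
--         elif subset:
--             result.append(subset)
--             subset = []
--         result.append(None)
--     return result
-- ===== SOURCE B (Python) =====
-- def make_subsets(booleans):
--     ''' Run-based rewrite: scan maximal runs of equal booleans; a True run becomes a
--     pending index range that is appended only when a False run follows it (so a
--     trailing True run is dropped, as in the original); a False run contributes one
--     None per element.'''
--     result = []
--     pending = None
--     i = 0
--     n = len(booleans)
--     while i < n:
--         j = i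
--         while j < n and booleans[j] == booleans[i]:
--             j += 1
--         if booleans[i]:
--             pending = list(range(i, j))
--         else:
--             if pending is not None:
--                 result.append(pending)
--                 pending = None
--             result.extend([None] * (j - i))
--         i = j
--     return result
-- ===== Notes on version B (the rewrite author's own statement) =====
-- stated objective: alternative
-- what changed: Replaced the per-element state machine with accumulating subset list by a run-based scan: B finds each maximal run of equal booleans at once, turns a True run into a pending range(i,j) appended only when a following False run flushes it, and emits the Nones for a False run in one block.
import Mathlib
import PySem

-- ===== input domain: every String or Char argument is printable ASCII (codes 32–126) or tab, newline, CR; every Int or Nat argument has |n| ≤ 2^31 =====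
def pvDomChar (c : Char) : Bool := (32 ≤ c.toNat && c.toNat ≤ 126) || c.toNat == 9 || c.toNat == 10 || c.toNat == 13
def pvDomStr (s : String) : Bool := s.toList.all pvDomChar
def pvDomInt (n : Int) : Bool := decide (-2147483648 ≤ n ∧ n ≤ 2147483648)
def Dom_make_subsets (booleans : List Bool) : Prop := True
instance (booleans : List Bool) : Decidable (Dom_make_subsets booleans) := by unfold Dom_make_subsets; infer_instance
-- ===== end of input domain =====

-- B replaces A's per-element state machine by a run-based scan over maximal runs of equal booleans (alternative decomposition, same cost).

-- ===== PORT A =====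
def make_subsets (booleans : List Bool) : List (Option (List Int)) :=
  ((PySem.List.pyRange 0 booleans.length 1).foldl
    (fun (st : List Int × List (Option (List Int))) b =>
      if PySem.List.pyGetD booleans b false then (st.1 ++ [b], st.2)
      else if st.1 ≠ [] then ([], st.2 ++ [some st.1, none])
      else (st.1, st.2 ++ [none]))
    ([], [])).2

-- ===== PORT B =====
-- maximal runs of equal booleans as (value, length) pairs (B's inner while loop)
def pvRuns : List Bool → List (Bool × Nat)
  | [] => []
  | x :: xs =>
    (x, (xs.takeWhile (· == x)).length + 1) :: pvRuns (xs.dropWhile (· == x))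
  termination_by l => l.length
  decreasing_by
    simp only [List.length_cons]
    exact Nat.lt_succ_of_le (List.length_dropWhile_le _ _)

def pvStepB (st : List (Option (List Int)) × Int × Option (List Int)) (g : Bool × Nat) :
    List (Option (List Int)) × Int × Option (List Int) :=
  if g.1 then (st.1, st.2.1 + g.2, some (PySem.List.pyRange st.2.1 (st.2.1 + g.2) 1))
  else ((st.2.2.elim st.1 (fun p => st.1 ++ [some p])) ++ List.replicate g.2 none, st.2.1 + g.2, none)

def make_subsets_alt (booleans : List Bool) : List (Option (List Int)) :=
  ((pvRuns booleans).foldl pvStepB ([], 0, none)).1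

-- ===== PRECONDITION & SPEC =====
def Spec_make_subsets (booleans : List Bool) (out : List (Option (List Int))) : Prop := out = make_subsets_alt booleans
instance (booleans : List Bool) (out : List (Option (List Int))) : Decidable (Spec_make_subsets booleans out) := by unfold Spec_make_subsets; infer_instance

-- ===== CLAIM (what is proved, stated in full; the proofs are below) =====
def Claim_equal_make_subsets : Prop := ∀ (booleans : List Bool), Dom_make_subsets booleans → Spec_make_subsets booleans (make_subsets booleans)

-- ===== LEMMAS AND PROOFS =====

-- A's loop body as a step over (index, value) pairs
def pvStepA (st : List Int × List (Option (List Int))) (p : Int × Bool) :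
    List Int × List (Option (List Int)) :=
  if p.2 then (st.1 ++ [p.1], st.2)
  else if st.1 ≠ [] then ([], st.2 ++ [some st.1, none])
  else (st.1, st.2 ++ [none])

def pvPend : Option (List Int) → List Int
  | none => []
  | some s => s

def pvIdx (i : Int) (k : Nat) : List Int := List.map (fun j : Nat => i + (j : Int)) (List.range k)

lemma make_subsets_eq_enum (bs : List Bool) :
    make_subsets bs = ((PySem.List.enumerate bs 0).foldl pvStepA ([], [])).2 := by
  unfold make_subsets
  rw [PySem.List.enumerate_eq_map_pyRange bs false, List.foldl_map]
  rfl

lemma pvIdx_shift (k : Nat) (i : Int) :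
    [i] ++ pvIdx (i + 1) k = pvIdx i (k + 1) := by
  unfold pvIdx
  apply List.ext_getElem
  · simp
  · intro m h1 h2
    rcases m with _ | m
    · simp
    · simp
      omega

lemma pvIdx_ne_nil (i : Int) (k : Nat) : pvIdx i (k + 1) ≠ [] := by
  unfold pvIdx
  simp

lemma Afold_true_run (k : Nat) : ∀ (i : Int) (s : List Int) (r : List (Option (List Int))),
    (PySem.List.enumerate (List.replicate k true) i).foldl pvStepA (s, r)
      = (s ++ pvIdx i k, r) := by
  induction k with
  | zero => intro i s r; simp [pvIdx]
  | succ k ih =>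
    intro i s r
    rw [List.replicate_succ, PySem.List.enumerate_cons, List.foldl_cons]
    have hstep : pvStepA (s, r) (i, true) = (s ++ [i], r) := by simp [pvStepA]
    rw [hstep, ih (i + 1) (s ++ [i]) r, List.append_assoc, pvIdx_shift]

lemma Afold_false_run (m : Nat) : ∀ (i : Int) (r : List (Option (List Int))),
    (PySem.List.enumerate (List.replicate m false) i).foldl pvStepA ([], r)
      = ([], r ++ List.replicate m none) := by
  induction m with
  | zero => intro i r; simp
  | succ m ih =>
    intro i r
    rw [List.replicate_succ, PySem.List.enumerate_cons, List.foldl_cons]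
    have hstep : pvStepA ([], r) (i, false) = ([], r ++ [none]) := by simp [pvStepA]
    rw [hstep, ih (i + 1) (r ++ [none])]
    simp [List.replicate_succ]

lemma run_decomp (x : Bool) (xs : List Bool) :
    x :: xs = List.replicate ((xs.takeWhile (· == x)).length + 1) x ++ xs.dropWhile (· == x) := by
  have h : xs.takeWhile (· == x) = List.replicate (xs.takeWhile (· == x)).length x := by
    apply List.eq_replicate_of_mem
    intro b hb
    have := List.mem_takeWhile_imp hb
    simpa using this
  conv_lhs => rw [← List.takeWhile_append_dropWhile (p := (· == x)) (l := xs)]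
  rw [List.replicate_succ, List.cons_append]
  congr 1
  conv_lhs => rw [h]

lemma head_dropWhile_ne (x : Bool) (xs : List Bool) :
    (xs.dropWhile (· == x)).head? ≠ some x := by
  have h := List.head?_dropWhile_not (· == x) xs
  intro hc
  rw [hc] at h
  simp at h

lemma pyRange_eq_pvIdx (i : Int) (k : Nat) :
    PySem.List.pyRange i (i + (k : Int)) 1 = pvIdx i k := by
  rw [PySem.List.pyRange_one]
  unfold pvIdx
  have h : (i + (k : Int) - i).toNat = k := by omega
  rw [h]

lemma main_lemma (n : Nat) : ∀ (bs : List Bool), bs.length ≤ n →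
    ∀ (i : Int) (r : List (Option (List Int))) (p : Option (List Int)),
    (p = none ∨ (∃ s, p = some s ∧ s ≠ [] ∧ bs.head? ≠ some true)) →
    ((PySem.List.enumerate bs i).foldl pvStepA (pvPend p, r)).2
      = ((pvRuns bs).foldl pvStepB (r, i, p)).1 := by
  induction n with
  | zero =>
    intro bs hlen i r p _
    have : bs = [] := List.eq_nil_of_length_eq_zero (Nat.le_zero.mp hlen)
    subst this
    simp [pvRuns]
  | succ n ih =>
    intro bs hlen i r p hp
    match bs with
    | [] => simp [pvRuns]
    | b :: l =>
      have hdec : b :: l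
          = List.replicate ((l.takeWhile (· == b)).length + 1) b ++ l.dropWhile (· == b) :=
        run_decomp b l
      have hrestlen : (l.dropWhile (· == b)).length ≤ n := by
        have h1 := List.length_dropWhile_le (· == b) l
        simp only [List.length_cons] at hlen
        omega
      have hruns : pvRuns (b :: l)
          = (b, (l.takeWhile (· == b)).length + 1) :: pvRuns (l.dropWhile (· == b)) := by
        rw [pvRuns]
      have hresthead : (l.dropWhile (· == b)).head? ≠ some b := head_dropWhile_ne b l
      rw [hruns, List.foldl_cons, hdec, PySem.List.enumerate_append, List.foldl_append,
        List.length_replicate]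
      cases b with
      | true =>
        have hpnone : p = none := by
          rcases hp with h | ⟨s, rfl, hs, hh⟩
          · exact h
          · exact absurd rfl hh
        subst hpnone
        rw [show pvPend none = ([] : List Int) from rfl, Afold_true_run, List.nil_append]
        have hstep : pvStepB (r, i, (none : Option (List Int)))
              (true, (l.takeWhile (· == true)).length + 1)
            = (r, i + (((l.takeWhile (· == true)).length + 1 : Nat) : Int),
               some (PySem.List.pyRange i
                 (i + (((l.takeWhile (· == true)).length + 1 : Nat) : Int)) 1)) := rfl
        rw [hstep, pyRange_eq_pvIdx]
        exact ih _ hrestlen _ r _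
          (Or.inr ⟨_, rfl, pvIdx_ne_nil i _, by simpa using hresthead⟩)
      | false =>
        rw [List.replicate_succ, PySem.List.enumerate_cons, List.foldl_cons]
        cases p with
        | none =>
          have hstepA : pvStepA (pvPend none, r) (i, false) = ([], r ++ [none]) := by
            simp [pvStepA, pvPend]
          rw [hstepA, Afold_false_run]
          have hstepB : pvStepB (r, i, (none : Option (List Int)))
                (false, (l.takeWhile (· == false)).length + 1)
              = (r ++ List.replicate ((l.takeWhile (· == false)).length + 1) none,
                 i + (((l.takeWhile (· == false)).length + 1 : Nat) : Int), none) := rfl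
          rw [hstepB]
          have hres : (r ++ [none]) ++ List.replicate (l.takeWhile (· == false)).length none
              = r ++ List.replicate ((l.takeWhile (· == false)).length + 1)
                  (none : Option (List Int)) := by
            simp [List.replicate_succ]
          rw [hres]
          have := ih _ hrestlen (i + (((l.takeWhile (· == false)).length + 1 : Nat) : Int))
            (r ++ List.replicate ((l.takeWhile (· == false)).length + 1) none) none (Or.inl rfl)
          rw [show pvPend none = ([] : List Int) from rfl] at this
          exact this
        | some s =>
          have hs : s ≠ [] := by
            rcases hp with h | ⟨s', heq, hs', hh⟩
            · exact absurd h (by simp)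
            · cases heq; exact hs'
          have hstepA : pvStepA (pvPend (some s), r) (i, false)
              = ([], r ++ [some s, none]) := by
            simp [pvStepA, pvPend, hs]
          rw [hstepA, Afold_false_run]
          have hstepB : pvStepB (r, i, some s)
                (false, (l.takeWhile (· == false)).length + 1)
              = ((r ++ [some s]) ++ List.replicate ((l.takeWhile (· == false)).length + 1) none,
                 i + (((l.takeWhile (· == false)).length + 1 : Nat) : Int), none) := rfl
          rw [hstepB]
          have hres : (r ++ [some s, none]) ++ List.replicate (l.takeWhile (· == false)).length none
              = (r ++ [some s]) ++ List.replicate ((l.takeWhile (· == false)).length + 1)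
                  (none : Option (List Int)) := by
            simp [List.replicate_succ]
          rw [hres]
          have := ih _ hrestlen (i + (((l.takeWhile (· == false)).length + 1 : Nat) : Int))
            ((r ++ [some s]) ++ List.replicate ((l.takeWhile (· == false)).length + 1) none)
            none (Or.inl rfl)
          rw [show pvPend none = ([] : List Int) from rfl] at this
          exact this

-- ===== VERDICT (by name: the statement is the Claim_ definition above) =====
theorem make_subsets_spec : Claim_equal_make_subsets := by
  intro bs _
  unfold Spec_make_subsets make_subsets_alt
  rw [make_subsets_eq_enum]
  have := main_lemma bs.length bs le_rfl 0 [] none (Or.inl rfl)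
  simpa [pvPend] using this
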